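-- pv_equiv track=rewrite | github.com/noynetanel/Symnmf | analysis.py | max_indices
-- ===== SOURCE A (Python) =====
-- def max_indices(matrix): # matrix is list of lists
--     max_ind = []
--     for lst in matrix:
--         if len(lst) == 0:
--             max_ind.append(None) # empty list
--         else:
--             max_ind.append(lst.index(max(lst)))
--     return max_ind
-- ===== SOURCE B (Python) =====
-- def max_indices(matrix):
--     def argmax_first(lst):
--         if not lst:
--             return None
--         best, best_i = lst[0], 0
--         for i, v in enumerate(lst[1:], 1):
--             if v > best:
--                 best, best_i = v, i
--         return best_i
--     return [argmax_first(lst) for lst in matrix]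
-- ===== Notes on version B (the rewrite author's own statement) =====
-- stated objective: alternative
-- what changed: Each row's first-maximum index is found in one running-argmax scan (strict > keeps the earliest tie) instead of two library passes max() then .index(), and rows are produced by a comprehension instead of an accumulator loop.
import Mathlib
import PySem

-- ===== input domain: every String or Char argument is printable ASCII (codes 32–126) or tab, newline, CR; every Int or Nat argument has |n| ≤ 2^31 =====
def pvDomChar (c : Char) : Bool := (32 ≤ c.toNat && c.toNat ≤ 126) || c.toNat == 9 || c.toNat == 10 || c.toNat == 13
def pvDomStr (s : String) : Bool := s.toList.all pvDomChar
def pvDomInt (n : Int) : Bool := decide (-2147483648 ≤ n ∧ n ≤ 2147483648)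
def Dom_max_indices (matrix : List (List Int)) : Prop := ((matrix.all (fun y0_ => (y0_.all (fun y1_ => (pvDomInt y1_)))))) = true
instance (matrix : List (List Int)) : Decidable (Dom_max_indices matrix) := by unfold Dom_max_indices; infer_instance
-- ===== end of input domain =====

-- B replaces A's max()-then-.index() double pass per row by a single running-argmax scan; return value only, no mutation.

-- ===== PORT A =====
-- A: accumulator loop; per row: None for empty, else lst.index(max(lst)).
def max_indices (matrix : List (List Int)) : List (Option Int) :=
  matrix.foldl (fun acc lst =>
    acc ++ [if lst.length == 0 then none
            else match PySem.List.max? lst (fun y => y) with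
                 | none => none   -- unreachable: lst nonempty
                 | some m => (PySem.List.index? lst m).map (fun k => (k : Int))]) []

-- ===== PORT B =====
-- one-pass running argmax over the tail, strict > so the first maximum wins
def argmaxLoop : List Int → Int → Nat → Nat → Int × Nat
  | [], b, bi, _ => (b, bi)
  | v :: t, b, bi, i => if b < v then argmaxLoop t v i (i + 1) else argmaxLoop t b bi (i + 1)

def argmaxFirst : List Int → Option Int
  | [] => none
  | x :: t => some (((argmaxLoop t x 0 1).2 : Int))

def max_indices_alt (matrix : List (List Int)) : List (Option Int) :=
  matrix.map argmaxFirst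

-- ===== PRECONDITION & SPEC =====
def Spec_max_indices (matrix : List (List Int)) (out : List (Option Int)) : Prop := out = max_indices_alt matrix
instance (matrix : List (List Int)) (out : List (Option Int)) : Decidable (Spec_max_indices matrix out) := by unfold Spec_max_indices; infer_instance

-- ===== CLAIM (what is proved, stated in full; the proofs are below) =====
def Claim_equal_max_indices : Prop := ∀ (matrix : List (List Int)), Dom_max_indices matrix → Spec_max_indices matrix (max_indices matrix)

-- ===== LEMMAS AND PROOFS =====

-- loop invariant: if b is a maximum of the scanned prefix `pre` and bi its first index,
-- the loop returns a maximum of pre ++ t together with its first index in pre ++ t.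
lemma argmaxLoop_inv (t : List Int) : ∀ (pre : List Int) (b : Int) (bi : Nat),
    (∀ y ∈ pre, y ≤ b) → PySem.List.index? pre b = some bi →
    (∀ y ∈ pre ++ t, y ≤ (argmaxLoop t b bi pre.length).1) ∧
    PySem.List.index? (pre ++ t) (argmaxLoop t b bi pre.length).1
      = some (argmaxLoop t b bi pre.length).2 := by
  induction t with
  | nil =>
    intro pre b bi hmax hidx
    simpa [argmaxLoop] using ⟨hmax, hidx⟩
  | cons v t ih =>
    intro pre b bi hmax hidx
    have hbmem : b ∈ pre := (PySem.List.index?_isSome_iff pre b).mp (by rw [hidx]; rfl)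
    by_cases h : b < v
    · have hnot : v ∉ pre := fun hv => absurd (hmax v hv) (by omega)
      have h1 : ∀ y ∈ pre ++ [v], y ≤ v := by
        intro y hy
        rcases List.mem_append.mp hy with hy | hy
        · exact le_of_lt (lt_of_le_of_lt (hmax y hy) h)
        · simp at hy; omega
      have h2 : PySem.List.index? (pre ++ [v]) v = some pre.length :=
        PySem.List.index?_append_singleton_self pre v hnot
      have := ih (pre ++ [v]) v pre.length h1 h2
      simpa [argmaxLoop, h, List.append_assoc] using this
    · have h1 : ∀ y ∈ pre ++ [v], y ≤ b := by
        intro y hy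
        rcases List.mem_append.mp hy with hy | hy
        · exact hmax y hy
        · simp at hy; omega
      have h2 : PySem.List.index? (pre ++ [v]) b = some bi := by
        rw [PySem.List.index?_append_of_mem [v] hbmem]; exact hidx
      have := ih (pre ++ [v]) b bi h1 h2
      simpa [argmaxLoop, h, List.append_assoc] using this

-- per-row agreement of the two ports
lemma row_eq (lst : List Int) :
    (if lst.length == 0 then none
     else match PySem.List.max? lst (fun y => y) with
          | none => none
          | some m => (PySem.List.index? lst m).map (fun k => ((k : Int))))
    = argmaxFirst lst := by
  cases lst with
  | nil => simp [argmaxFirst]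
  | cons x t =>
    have hmax : PySem.List.max? (x :: t) (fun y => y) = some (t.foldl max x) :=
      PySem.List.max?_id_cons x t
    have hinv := argmaxLoop_inv t [x] x 0 (by simp) (PySem.List.index?_cons_self x [])
    simp only [List.length_singleton, List.singleton_append] at hinv
    obtain ⟨hisMax, hidx⟩ := hinv
    set r := argmaxLoop t x 0 1 with hr
    -- the value maxes agree
    have hm_mem : t.foldl max x ∈ x :: t := PySem.List.max?_mem hmax
    have hm_isMax : ∀ y ∈ x :: t, y ≤ t.foldl max x := by
      intro y hy; simpa using PySem.List.max?_isMax hmax y hy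
    have hr_mem : r.1 ∈ x :: t :=
      (PySem.List.index?_isSome_iff (x :: t) r.1).mp (by rw [hidx]; rfl)
    have hval : t.foldl max x = r.1 :=
      le_antisymm (hisMax _ hm_mem) (hm_isMax _ hr_mem)
    rw [PySem.List.index?_eq_idxOf?] at hidx
    simp [argmaxFirst, hmax, hval, hidx, ← hr, Option.map]

-- ===== VERDICT (by name: the statement is the Claim_ definition above) =====
theorem max_indices_spec : Claim_equal_max_indices := by
  intro matrix _
  show max_indices matrix = max_indices_alt matrix
  unfold max_indices max_indices_alt
  rw [PySem.List.foldl_append_singleton_eq_map]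
  exact List.map_congr_left (fun lst _ => row_eq lst)
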